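-- pv_equiv track=rewrite | github.com/saherhanif/python-practices | python practices/untitled28.py | build
-- ===== SOURCE A (Python) =====
-- def build(a,b):
--     if b==0:
--         return 0
--     #if b equal 0 return 0
--     if b==1:
--         return a%10
--     #if be equal 1 we return the last digit of a
--     if b<10:
--         return a%10*b
--     #if b is one digit return the last digit of a multiplied b
--     return a%10 *b%10+10* build(a//10,b//10)
-- ===== SOURCE B (Python) =====
-- def build(a, b):
--     # Iterative re-implementation: accumulate digit products with a place weight.
--     result = 0
--     weight = 1
--     while b >= 10:
--         result += weight * ((a % 10 * b) % 10)
--         weight *= 10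
--         a //= 10
--         b //= 10
--     return result + weight * (a % 10 * b)
-- ===== Notes on version B (the rewrite author's own statement) =====
-- stated objective: alternative
-- what changed: Replaced the recursion by an iterative loop that maintains an accumulator and a place-value weight, collapsing the three base cases into one final term.
import Mathlib
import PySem

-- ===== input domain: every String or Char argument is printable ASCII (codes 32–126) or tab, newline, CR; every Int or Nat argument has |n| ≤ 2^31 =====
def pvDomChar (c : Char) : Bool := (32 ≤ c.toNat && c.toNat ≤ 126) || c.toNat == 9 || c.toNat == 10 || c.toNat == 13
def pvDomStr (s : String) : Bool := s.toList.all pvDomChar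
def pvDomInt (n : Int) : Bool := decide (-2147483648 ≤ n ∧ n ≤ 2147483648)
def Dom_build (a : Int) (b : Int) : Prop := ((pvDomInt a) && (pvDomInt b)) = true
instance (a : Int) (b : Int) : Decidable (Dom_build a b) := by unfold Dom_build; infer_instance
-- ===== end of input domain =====

-- ===== PORT A =====
-- B replaces A's recursion by an iterative accumulator/weight loop (alternative decomposition, same cost).
def build (a : Int) (b : Int) : Int :=
  if b = 0 then 0
  else if b = 1 then PySem.Int.mod a 10
  else if b < 10 then PySem.Int.mod a 10 * b
  else PySem.Int.mod (PySem.Int.mod a 10 * b) 10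
       + 10 * build (PySem.Int.floordiv a 10) (PySem.Int.floordiv b 10)
termination_by b.toNat
decreasing_by
  have h10 : (10:Int) ≤ b := by omega
  have := PySem.Int.floordiv_eq_ediv_of_pos (a := b) (b := 10) (by norm_num)
  rw [this]
  omega

-- ===== PORT B =====
def buildLoop (a : Int) (b : Int) (result : Int) (weight : Int) : Int :=
  if 10 ≤ b then
    buildLoop (PySem.Int.floordiv a 10) (PySem.Int.floordiv b 10)
      (result + weight * (PySem.Int.mod (PySem.Int.mod a 10 * b) 10)) (weight * 10)
  else result + weight * (PySem.Int.mod a 10 * b)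
termination_by b.toNat
decreasing_by
  have := PySem.Int.floordiv_eq_ediv_of_pos (a := b) (b := 10) (by norm_num)
  rw [this]
  omega

def build_alt (a : Int) (b : Int) : Int := buildLoop a b 0 1

-- ===== PRECONDITION & SPEC =====
def Spec_build (a : Int) (b : Int) (out : Int) : Prop := out = build_alt a b
instance (a : Int) (b : Int) (out : Int) : Decidable (Spec_build a b out) := by unfold Spec_build; infer_instance

-- ===== CLAIM (what is proved, stated in full; the proofs are below) =====
def Claim_equal_build : Prop := ∀ (a : Int) (b : Int), Dom_build a b → Spec_build a b (build a b)

-- ===== LEMMAS AND PROOFS =====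

-- ===== VERDICT (by name: the statement is the Claim_ definition above) =====
-- loop invariant: the loop computes result + weight * build a b
theorem buildLoop_eq (a b result weight : Int) :
    buildLoop a b result weight = result + weight * build a b := by
  induction a, b, result, weight using buildLoop.induct with
  | case1 a b result weight h ih =>
    rw [buildLoop, if_pos h, ih]
    conv_rhs => rw [build]
    have h0 : ¬ b = 0 := by omega
    have h1 : ¬ b = 1 := by omega
    have h2 : ¬ b < 10 := by omega
    rw [if_neg h0, if_neg h1, if_neg h2]
    ring
  | case2 a b result weight h =>
    rw [buildLoop, if_neg h, build]
    by_cases h0 : b = 0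
    · subst h0; simp
    · by_cases h1 : b = 1
      · subst h1; simp
      · rw [if_neg h0, if_neg h1, if_pos (by omega)]

theorem build_spec : Claim_equal_build := by
  intro a b _
  unfold Spec_build build_alt
  rw [buildLoop_eq]
  ring
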